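-- pv_equiv track=rewrite | github.com/belleruivo/Exercicios-POO-AEDD | AEED-EXERCICIOS/M1L (POO também)/ex31-multiplicacao_dois_inteiros.py | multiplica
-- ===== SOURCE A (Python) =====
-- def multiplica(a, b):
--     if a == 0 or b == 0:
--         return 0
--
--     resultado = 0
--     for _ in range(abs(b)):
--         resultado += abs(a)
--
--     # Ajustar o sinal do resultado
--     if (a < 0 and b > 0) or (a > 0 and b < 0):
--         resultado = -resultado
--
--     return resultado
-- ===== SOURCE B (Python) =====
-- def multiplica(a, b):
--     x, y = abs(a), abs(b)
--     result = 0
--     while y > 0: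
--         if y & 1:
--             result += x
--         x <<= 1
--         y >>= 1
--     return -result if (a < 0) != (b < 0) else result
-- ===== Notes on version B (the rewrite author's own statement) =====
-- stated objective: faster
-- what changed: Replaces the O(|b|) repeated-addition loop with Russian peasant multiplication (shift-and-add over the bits of |b|, O(log |b|) iterations).
import Mathlib
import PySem

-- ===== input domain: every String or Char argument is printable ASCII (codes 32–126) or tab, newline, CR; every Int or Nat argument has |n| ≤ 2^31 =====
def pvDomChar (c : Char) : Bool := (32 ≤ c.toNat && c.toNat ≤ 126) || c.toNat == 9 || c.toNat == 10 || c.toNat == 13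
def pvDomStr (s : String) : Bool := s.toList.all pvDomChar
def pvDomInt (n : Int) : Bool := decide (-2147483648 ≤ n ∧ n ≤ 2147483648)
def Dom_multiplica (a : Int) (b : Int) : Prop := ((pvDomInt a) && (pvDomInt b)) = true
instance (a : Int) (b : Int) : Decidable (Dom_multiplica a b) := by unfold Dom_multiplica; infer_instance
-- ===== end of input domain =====

-- B replaces A's O(|b|) repeated-addition loop with Russian peasant (shift-and-add) multiplication, O(log |b|) iterations.

-- ===== PORT A =====
-- for _ in range(abs(b)): resultado += abs(a)
def multiplica (a : Int) (b : Int) : Int :=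
  if a = 0 ∨ b = 0 then 0
  else
    let resultado : Int := (PySem.List.pyRange 0 |b| 1).foldl (fun r _ => r + |a|) 0
    if (a < 0 ∧ b > 0) ∨ (a > 0 ∧ b < 0) then -resultado else resultado

-- ===== PORT B =====
-- while y > 0: if y & 1: result += x; x <<= 1; y >>= 1   (y kept as a Nat since y = abs(b) ≥ 0)
def peasantLoop (x : Int) (y : Nat) (result : Int) : Int :=
  if y = 0 then result
  else peasantLoop (x * 2) (y / 2) (if y % 2 = 1 then result + x else result)
termination_by y
decreasing_by omega

def multiplica_alt (a : Int) (b : Int) : Int :=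
  let result := peasantLoop |a| b.natAbs 0
  -- Python's `(a < 0) != (b < 0)` (boolean inequality = exclusive or)
  if ((a < 0) ∧ ¬(b < 0)) ∨ (¬(a < 0) ∧ (b < 0)) then -result else result

-- ===== PRECONDITION & SPEC =====
def Spec_multiplica (a : Int) (b : Int) (out : Int) : Prop := out = multiplica_alt a b
instance (a : Int) (b : Int) (out : Int) : Decidable (Spec_multiplica a b out) := by unfold Spec_multiplica; infer_instance

-- ===== CLAIM (what is proved, stated in full; the proofs are below) =====
def Claim_equal_multiplica : Prop := ∀ (a : Int) (b : Int), Dom_multiplica a b → Spec_multiplica a b (multiplica a b)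

-- ===== LEMMAS AND PROOFS =====

theorem foldl_add_const (l : List Int) (c : Int) : ∀ s : Int,
    l.foldl (fun r _ => r + c) s = s + c * l.length := by
  induction l with
  | nil => intro s; simp
  | cons h t ih => intro s; simp [List.foldl, ih]; ring

theorem peasantLoop_eq (y : Nat) : ∀ (x result : Int),
    peasantLoop x y result = result + x * y := by
  induction y using Nat.strong_induction_on with
  | _ y ih =>
    intro x result
    unfold peasantLoop
    by_cases h : y = 0
    · simp [h]
    · have h2 : y / 2 < y := by omega
      simp only [h, if_neg, ih (y / 2) h2]
      have hy : (y : Int) = 2 * ((y / 2 : Nat) : Int) + ((y % 2 : Nat) : Int) := by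
        push_cast; omega
      by_cases hm : y % 2 = 1
      · simp only [hm, if_pos]; rw [hy, hm]; push_cast; ring
      · have hm0 : y % 2 = 0 := by omega
        simp only [hm, if_neg]; rw [hy, hm0]; push_cast; ring

theorem multiplica_eq_mul (a b : Int) : multiplica a b = a * b := by
  unfold multiplica
  by_cases h0 : a = 0 ∨ b = 0
  · rcases h0 with h | h <;> simp [h]
  · push_neg at h0
    rw [if_neg (not_or.mpr ⟨h0.1, h0.2⟩)]
    rw [foldl_add_const, PySem.List.length_pyRange_one, sub_zero,
        Int.toNat_of_nonneg (abs_nonneg b)]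
    rcases lt_trichotomy a 0 with ha | ha | ha <;>
      rcases lt_trichotomy b 0 with hb | hb | hb <;>
      first
        | exact absurd ha h0.1
        | exact absurd hb h0.2
        | · (first | rw [abs_of_neg ha] | rw [abs_of_pos ha])
            (first | rw [abs_of_neg hb] | rw [abs_of_pos hb])
            split_ifs with hc
            · first | (exfalso; omega) | ring
            · first | (exfalso; omega) | ring

theorem multiplica_alt_eq_mul (a b : Int) : multiplica_alt a b = a * b := by
  unfold multiplica_alt
  rw [peasantLoop_eq, Int.natCast_natAbs]
  rcases lt_trichotomy a 0 with ha | ha | ha <;>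
    rcases lt_trichotomy b 0 with hb | hb | hb <;>
    · (first | rw [abs_of_neg ha] | rw [ha, abs_zero] | rw [abs_of_pos ha])
      (first | rw [abs_of_neg hb] | rw [hb, abs_zero] | rw [abs_of_pos hb])
      split_ifs with hc
      · first | (exfalso; omega) | ring
      · first | (exfalso; omega) | ring

theorem multiplica_spec' (a b : Int) : multiplica a b = multiplica_alt a b := by
  rw [multiplica_eq_mul, multiplica_alt_eq_mul]

-- ===== VERDICT (by name: the statement is the Claim_ definition above) =====
theorem multiplica_spec : Claim_equal_multiplica := by
  intro a b _
  unfold Spec_multiplica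
  exact multiplica_spec' a b
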